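-- pv_equiv track=rewrite | github.com/inergoul/boostcamp_peer_session | coding_test/42860_조이스틱/solution_LTH.py | solution
-- ===== SOURCE A (Python) =====
-- def solution(name):
--     n = len(name)
--     answer = idx = 0
--     remain = [1 if 'A' == name[i] else 0 for i in range(n)]
--
--     while 1:
--         left = right = 1
--         answer += min(ord(name[idx]) - ord('A'), ord('A') + 26 - ord(name[idx])) # ord: 아스키코드 변환
--         remain[idx] = 1 # 완료된 문자는 1로 변경
--
--         while remain[idx - left if idx >= left else idx + n - left]:
--             left += 1
--             if left >= n: # 자기 자신으로 돌아오면 반환(더 이상 바꿀게 없는 경우)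
--                 return answer
--
--         while remain[idx + right if idx < n - right else idx - n + right]:
--             right += 1
--
--         if left < right:
--             idx = idx - left if idx >= left else idx + n - left
--         else:
--             idx = idx + right if idx < n - right else idx - n + right
--
--         answer += min(left, right)
-- ===== SOURCE B (Python) =====
-- def solution(name):
--     n = len(name)
--     answer = sum(min(ord(c) - ord('A'), ord('A') + 26 - ord(c)) for c in name)
--     todo = {i for i in range(n) if name[i] != 'A'}
--     todo.discard(0)
--     idx = 0
--     while todo:
--         left = min((idx - s) % n for s in todo)
--         right = min((s - idx) % n for s in todo)
--         if left < right:
--             idx = (idx - left) % n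
--         else:
--             idx = (idx + right) % n
--         answer += min(left, right)
--         todo.discard(idx)
--     return answer
-- ===== Notes on version B (the rewrite author's own statement) =====
-- stated objective: alternative
-- what changed: B computes the vertical cost as one closed-form sum over the characters and replaces A's remain-array with its incremental inner scanning while-loops by a pending-index set walked via minima of modular distances (min((idx-s)%n) / min((s-idx)%n)), removing each reached index.
-- outside the precondition, e.g. on solution(''): A raises IndexError, B returns 0
import Mathlib
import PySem

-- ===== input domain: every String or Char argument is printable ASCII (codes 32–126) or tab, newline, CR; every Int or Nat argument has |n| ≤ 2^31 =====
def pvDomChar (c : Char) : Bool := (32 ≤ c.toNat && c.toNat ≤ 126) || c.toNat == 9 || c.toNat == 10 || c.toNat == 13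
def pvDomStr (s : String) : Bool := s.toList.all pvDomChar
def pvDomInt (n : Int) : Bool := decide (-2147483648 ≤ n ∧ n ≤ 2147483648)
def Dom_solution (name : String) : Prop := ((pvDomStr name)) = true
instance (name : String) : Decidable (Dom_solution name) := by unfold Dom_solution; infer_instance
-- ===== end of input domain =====

-- B replaces A's incremental vertical accounting and inner scanning while-loops by a single
-- vertical sum plus a pending-index set walked with modular-distance minima (objective: alternative).

-- ===== PORT A =====

-- ord(name[idx]) ; the default 0 is never used on in-range indices
def pvOrdAt (name : String) (i : Int) : Int :=
  match PySem.Str.pyGet? name i with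
  | some c => (c.toNat : Int)
  | none => 0

-- answer += min(ord(name[idx]) - ord('A'), ord('A') + 26 - ord(name[idx]))
def pvVert (name : String) (i : Int) : Int :=
  min (pvOrdAt name i - 65) (65 + 26 - pvOrdAt name i)

-- while remain[idx - left if idx >= left else idx + n - left]: left += 1; if left >= n: return
-- (fuel-bounded; `none` = the `return answer` branch; fuel n suffices on every reachable call)
def pvLeftLoopA (remain : List Int) (idx n : Int) : Nat → Int → Option Int
  | 0, left => some left
  | f + 1, left =>
    if PySem.List.pyGetD remain (if idx ≥ left then idx - left else idx + n - left) 0 ≠ 0 then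
      if left + 1 ≥ n then none
      else pvLeftLoopA remain idx n f (left + 1)
    else some left

-- while remain[idx + right if idx < n - right else idx - n + right]: right += 1
def pvRightLoopA (remain : List Int) (idx n : Int) : Nat → Int → Int
  | 0, right => right
  | f + 1, right =>
    if PySem.List.pyGetD remain (if idx < n - right then idx + right else idx - n + right) 0 ≠ 0 then
      pvRightLoopA remain idx n f (right + 1)
    else right

-- the outer `while 1` loop (fuel n suffices: each pass marks one fresh index done)
def pvLoopA (name : String) (n : Int) : Nat → List Int → Int → Int → Int
  | 0, _, _, answer => answer
  | f + 1, remain, idx, answer =>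
    let answer := answer + pvVert name idx
    let remain := PySem.List.pySetD remain idx 1
    match pvLeftLoopA remain idx n n.toNat 1 with
    | none => answer
    | some left =>
      let right := pvRightLoopA remain idx n n.toNat 1
      let idx' := if left < right then (if idx ≥ left then idx - left else idx + n - left)
                  else (if idx < n - right then idx + right else idx - n + right)
      pvLoopA name n f remain idx' (answer + min left right)

def solution (name : String) : Int :=
  let n : Int := PySem.Str.len name
  let remain := (PySem.List.pyRange 0 n 1).map
    (fun i => if PySem.Str.pyGet? name i = some 'A' then (1 : Int) else 0)
  pvLoopA name n n.toNat remain 0 0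

-- ===== PORT B =====

-- min(ord(c) - ord('A'), ord('A') + 26 - ord(c)) for one character
def pvVertChar (c : Char) : Int :=
  min ((c.toNat : Int) - 65) (65 + 26 - (c.toNat : Int))

-- the `while todo:` loop of B; fuel = initial size of todo (one element removed per pass)
def pvHLoop (n : Int) : Nat → List Int → Int → Int → Int
  | 0, _, _, answer => answer
  | f + 1, todo, idx, answer =>
    if todo = [] then answer
    else
      let left := (PySem.List.min? (todo.map (fun s => PySem.Int.mod (idx - s) n)) (fun x => x)).getD 0
      let right := (PySem.List.min? (todo.map (fun s => PySem.Int.mod (s - idx) n)) (fun x => x)).getD 0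
      let idx' := if left < right then PySem.Int.mod (idx - left) n else PySem.Int.mod (idx + right) n
      pvHLoop n f (PySem.Set.discard todo idx') idx' (answer + min left right)

def solution_alt (name : String) : Int :=
  let n : Int := PySem.Str.len name
  let answer := (name.toList.map pvVertChar).sum
  let todo : PySem.Set Int := PySem.Set.ofList
    ((PySem.List.pyRange 0 n 1).filter (fun i => !(PySem.Str.pyGet? name i == some 'A')))
  let todo := PySem.Set.discard todo 0
  pvHLoop n todo.length todo 0 answer

-- ===== PRECONDITION & SPEC =====
-- Pre_ excludes only the empty string, on which A raises IndexError (name[0] with n = 0).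
def Pre_solution (name : String) : Prop := name ≠ ""
instance (name : String) : Decidable (Pre_solution name) := by unfold Pre_solution; infer_instance

def pvWitness_solution : String := "JAZ"

def Spec_solution (name : String) (out : Int) : Prop := out = solution_alt name
instance (name : String) (out : Int) : Decidable (Spec_solution name out) := by unfold Spec_solution; infer_instance

-- ===== CLAIM (what is proved, stated in full; the proofs are below) =====
def Claim_equal_solution : Prop := ∀ (name : String), Dom_solution name → Pre_solution name → Spec_solution name (solution name)

-- ===== LEMMAS AND PROOFS =====

lemma pv_mod_eq_iff {n x l : Int} (hn : 0 < n) (hl : 0 ≤ l) (hl2 : l < n) :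
    PySem.Int.mod x n = l ↔ n ∣ (x - l) := by
  rw [PySem.Int.mod_eq_emod_of_pos hn]
  constructor
  · intro h
    refine ⟨x / n, ?_⟩
    have := Int.emod_def x n
    omega
  · rintro ⟨k, hk⟩
    have hx : x = l + n * k := by omega
    rw [hx, Int.add_mul_emod_self_left, Int.emod_eq_of_lt hl hl2]

lemma pv_mod_inv {n x s l : Int} (hn : 0 < n) (hs : 0 ≤ s) (hs2 : s < n) (hl : 0 ≤ l) (hl2 : l < n) :
    PySem.Int.mod (x - s) n = l ↔ PySem.Int.mod (x - l) n = s := by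
  rw [pv_mod_eq_iff hn hl hl2, pv_mod_eq_iff hn hs hs2]
  constructor <;> rintro ⟨k, hk⟩ <;> exact ⟨k, by omega⟩

lemma pv_mod_inv_r {n x s r : Int} (hn : 0 < n) (hs : 0 ≤ s) (hs2 : s < n) (hr : 0 ≤ r) (hr2 : r < n) :
    PySem.Int.mod (x + r) n = s ↔ PySem.Int.mod (s - x) n = r := by
  rw [pv_mod_eq_iff hn hs hs2, pv_mod_eq_iff hn hr hr2]
  constructor <;> rintro ⟨k, hk⟩
  · exact ⟨-k, by rw [mul_neg]; omega⟩
  · exact ⟨-k, by rw [mul_neg]; omega⟩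

lemma pv_mod_lpos {n idx l : Int} (hn : 0 < n) (hidx : 0 ≤ idx) (hidx2 : idx < n)
    (hl : 1 ≤ l) (hl2 : l ≤ n) :
    (if idx ≥ l then idx - l else idx + n - l) = PySem.Int.mod (idx - l) n := by
  rw [PySem.Int.mod_eq_emod_of_pos hn]
  split_ifs with h
  · rw [Int.emod_eq_of_lt (by omega) (by omega)]
  · have h1 : (idx - l) % n = (idx - l + n) % n := (Int.add_emod_right _ _).symm
    rw [h1, Int.emod_eq_of_lt (by omega) (by omega)]; omega

lemma pv_mod_rpos {n idx r : Int} (hn : 0 < n) (hidx : 0 ≤ idx) (hidx2 : idx < n)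
    (hr : 1 ≤ r) (hr2 : r ≤ n) :
    (if idx < n - r then idx + r else idx - n + r) = PySem.Int.mod (idx + r) n := by
  rw [PySem.Int.mod_eq_emod_of_pos hn]
  split_ifs with h
  · rw [Int.emod_eq_of_lt (by omega) (by omega)]
  · have h1 : (idx + r) % n = (idx + r - n + n) % n := by ring_nf
    rw [h1, Int.add_emod_right, Int.emod_eq_of_lt (by omega) (by omega)]; omega

lemma pv_dist_bounds {n a b : Int} (hn : 0 < n) (ha : 0 ≤ a) (ha2 : a < n)
    (hb : 0 ≤ b) (hb2 : b < n) (hne : a ≠ b) :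
    1 ≤ PySem.Int.mod (a - b) n ∧ PySem.Int.mod (a - b) n < n := by
  have h0 := PySem.Int.mod_nonneg (a - b) hn
  have h1 := PySem.Int.mod_lt (a - b) hn
  refine ⟨?_, h1⟩
  by_contra h
  have hz : PySem.Int.mod (a - b) n = 0 := by omega
  have hdvd : n ∣ (a - b) := (PySem.Int.mod_eq_zero_iff_dvd _ _).mp hz
  have := Int.eq_zero_of_abs_lt_dvd hdvd (by rw [abs_lt]; omega)
  omega

lemma pv_getD_set {rem : List Int} {idx j : Int} (hidx : 0 ≤ idx) (hj : 0 ≤ j) (hj2 : j < (rem.length : Int)) :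
    PySem.List.pyGetD (PySem.List.pySetD rem idx 1) j 0
      = if j = idx then 1 else PySem.List.pyGetD rem j 0 := by
  rw [PySem.List.pySetD_of_nonneg rem 1 hidx,
      PySem.List.pyGetD_eq_getElem _ 0 hj (by simpa using hj2),
      List.getElem_set, PySem.List.pyGetD_eq_getElem rem 0 hj hj2]
  split_ifs with h1 h2 h2 <;> first | rfl | omega

lemma pv_hloop_shift (n : Int) : ∀ (f : Nat) (todo : List Int) (idx a : Int),
    pvHLoop n f todo idx a = a + pvHLoop n f todo idx 0 := by
  intro f
  induction f with
  | zero => intro todo idx a; simp [pvHLoop]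
  | succ f ih =>
    intro todo idx a
    by_cases h : todo = []
    · simp [pvHLoop, h]
    · simp only [pvHLoop, if_neg h]
      rw [ih _ _ (a + _), ih _ _ (0 + _)]
      ring

lemma pv_hloop_nil (n : Int) (f : Nat) (idx a : Int) : pvHLoop n f [] idx a = a := by
  cases f <;> simp [pvHLoop]

lemma pv_min_spec {xs : List Int} (h : xs ≠ []) :
    (PySem.List.min? xs (fun x => x)).getD 0 ∈ xs ∧
      ∀ y ∈ xs, (PySem.List.min? xs (fun x => x)).getD 0 ≤ y := by
  cases hm : PySem.List.min? xs (fun x => x) with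
  | none => exact absurd ((PySem.List.min?_eq_none_iff xs _).mp hm) h
  | some m =>
    refine ⟨by simpa using PySem.List.min?_mem hm, ?_⟩
    intro y hy
    simpa using PySem.List.min?_isMin hm y hy

lemma pv_leftloop_none {rem' : List Int} {n idx : Int}
    (hcond : ∀ l : Int, 1 ≤ l → l ≤ n →
      PySem.List.pyGetD rem' (if idx ≥ l then idx - l else idx + n - l) 0 ≠ 0) :
    ∀ (f : Nat) (l : Int), 1 ≤ l → l ≤ n → (n - l).toNat < f →
      pvLeftLoopA rem' idx n f l = none := by
  intro f
  induction f with
  | zero => intro l _ _ h; omega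
  | succ f ih =>
    intro l hl hl2 hf
    simp only [pvLeftLoopA, if_pos (hcond l hl hl2)]
    by_cases h : l + 1 ≥ n
    · rw [if_pos h]
    · rw [if_neg h]
      exact ih (l + 1) (by omega) (by omega) (by omega)

lemma pv_leftloop_some {rem' : List Int} {n idx L : Int}
    (hL1 : 1 ≤ L) (hL2 : L < n)
    (hcond : ∀ l : Int, 1 ≤ l → l < L →
      PySem.List.pyGetD rem' (if idx ≥ l then idx - l else idx + n - l) 0 ≠ 0)
    (hhit : PySem.List.pyGetD rem' (if idx ≥ L then idx - L else idx + n - L) 0 = 0) :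
    ∀ (f : Nat) (l : Int), 1 ≤ l → l ≤ L → (L - l).toNat < f →
      pvLeftLoopA rem' idx n f l = some L := by
  intro f
  induction f with
  | zero => intro l _ _ h; omega
  | succ f ih =>
    intro l hl hl2 hf
    by_cases h : l = L
    · subst h
      simp only [pvLeftLoopA]
      rw [if_neg (by simp [hhit])]
    · simp only [pvLeftLoopA, if_pos (hcond l hl (by omega))]
      rw [if_neg (by omega)]
      exact ih (l + 1) (by omega) (by omega) (by omega)

lemma pv_rightloop_some {rem' : List Int} {n idx R : Int}
    (hR1 : 1 ≤ R) (hR2 : R < n)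
    (hcond : ∀ r : Int, 1 ≤ r → r < R →
      PySem.List.pyGetD rem' (if idx < n - r then idx + r else idx - n + r) 0 ≠ 0)
    (hhit : PySem.List.pyGetD rem' (if idx < n - R then idx + R else idx - n + R) 0 = 0) :
    ∀ (f : Nat) (r : Int), 1 ≤ r → r ≤ R → (R - r).toNat < f →
      pvRightLoopA rem' idx n f r = R := by
  intro f
  induction f with
  | zero => intro r _ _ h; omega
  | succ f ih =>
    intro r hr hr2 hf
    by_cases h : r = R
    · subst h
      simp only [pvRightLoopA]
      rw [if_neg (by simp [hhit])]
    · simp only [pvRightLoopA, if_pos (hcond r hr (by omega))]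
      exact ih (r + 1) (by omega) (by omega) (by omega)

def pvInv (n : Int) (rem todo : List Int) (idx : Int) : Prop :=
  0 < n ∧ (rem.length : Int) = n ∧ 0 ≤ idx ∧ idx < n ∧ todo.Nodup ∧
  ∀ j : Int, j ∈ todo ↔ (0 ≤ j ∧ j < n ∧ j ≠ idx ∧ PySem.List.pyGetD rem j 0 = 0)

lemma pv_mem_set {n : Int} {rem todo : List Int} {idx : Int} (hinv : pvInv n rem todo idx) :
    ∀ j : Int, 0 ≤ j → j < n →
      (PySem.List.pyGetD (PySem.List.pySetD rem idx 1) j 0 = 0 ↔ j ∈ todo) := by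
  obtain ⟨hn, hlen, hidx0, hidx1, hnd, hmem⟩ := hinv
  intro j hj0 hj1
  rw [pv_getD_set hidx0 hj0 (by omega), hmem j]
  split_ifs with h
  · subst h; simp
  · constructor
    · intro h0; exact ⟨hj0, hj1, h, h0⟩
    · intro h0; exact h0.2.2.2

lemma pv_bridgeL {n : Int} {rem todo : List Int} {idx : Int} (hinv : pvInv n rem todo idx)
    {l : Int} (hl : 1 ≤ l) (hl2 : l < n) :
    (PySem.List.pyGetD (PySem.List.pySetD rem idx 1)
        (if idx ≥ l then idx - l else idx + n - l) 0 = 0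
      ↔ l ∈ todo.map (fun s => PySem.Int.mod (idx - s) n)) := by
  obtain ⟨hn, hlen, hidx0, hidx1, hnd, hmem⟩ := hinv
  rw [pv_mod_lpos hn hidx0 hidx1 hl (by omega)]
  have hp0 := PySem.Int.mod_nonneg (idx - l) hn
  have hp1 := PySem.Int.mod_lt (idx - l) hn
  rw [pv_mem_set ⟨hn, hlen, hidx0, hidx1, hnd, hmem⟩ _ hp0 hp1]
  constructor
  · intro hp
    exact List.mem_map.mpr ⟨_, hp, (pv_mod_inv hn hp0 hp1 (by omega) hl2).mpr rfl⟩
  · intro hlD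
    obtain ⟨s, hs, hsd⟩ := List.mem_map.mp hlD
    obtain ⟨hs0, hs1, _, _⟩ := (hmem s).mp hs
    have := (pv_mod_inv hn hs0 hs1 (by omega) hl2).mp hsd
    rwa [this]

lemma pv_bridgeR {n : Int} {rem todo : List Int} {idx : Int} (hinv : pvInv n rem todo idx)
    {r : Int} (hr : 1 ≤ r) (hr2 : r < n) :
    (PySem.List.pyGetD (PySem.List.pySetD rem idx 1)
        (if idx < n - r then idx + r else idx - n + r) 0 = 0
      ↔ r ∈ todo.map (fun s => PySem.Int.mod (s - idx) n)) := by
  obtain ⟨hn, hlen, hidx0, hidx1, hnd, hmem⟩ := hinv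
  rw [pv_mod_rpos hn hidx0 hidx1 hr (by omega)]
  have hp0 := PySem.Int.mod_nonneg (idx + r) hn
  have hp1 := PySem.Int.mod_lt (idx + r) hn
  rw [pv_mem_set ⟨hn, hlen, hidx0, hidx1, hnd, hmem⟩ _ hp0 hp1]
  constructor
  · intro hp
    exact List.mem_map.mpr ⟨_, hp, (pv_mod_inv_r hn hp0 hp1 (by omega) hr2).mp rfl⟩
  · intro hrD
    obtain ⟨s, hs, hsd⟩ := List.mem_map.mp hrD
    obtain ⟨hs0, hs1, _, _⟩ := (hmem s).mp hs
    have := (pv_mod_inv_r hn hs0 hs1 (by omega) hr2).mpr hsd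
    rwa [this]

lemma pv_dist_mem_bounds {n : Int} {rem todo : List Int} {idx : Int} (hinv : pvInv n rem todo idx)
    {d : Int} (hd : d ∈ todo.map (fun s => PySem.Int.mod (idx - s) n) ∨
                    d ∈ todo.map (fun s => PySem.Int.mod (s - idx) n)) :
    1 ≤ d ∧ d < n := by
  obtain ⟨hn, hlen, hidx0, hidx1, hnd, hmem⟩ := hinv
  rcases hd with hd | hd <;> obtain ⟨s, hs, hsd⟩ := List.mem_map.mp hd <;>
    obtain ⟨hs0, hs1, hsne, _⟩ := (hmem s).mp hs <;> subst hsd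
  · exact pv_dist_bounds hn hidx0 hidx1 hs0 hs1 (fun h => hsne h.symm)
  · exact pv_dist_bounds hn hs0 hs1 hidx0 hidx1 hsne

lemma pvLoopA_succ (name : String) (n : Int) (f : Nat) (rem : List Int) (idx a : Int) :
    pvLoopA name n (f + 1) rem idx a =
      match pvLeftLoopA (PySem.List.pySetD rem idx 1) idx n n.toNat 1 with
      | none => a + pvVert name idx
      | some left =>
        let right := pvRightLoopA (PySem.List.pySetD rem idx 1) idx n n.toNat 1
        let idx' := if left < right then (if idx ≥ left then idx - left else idx + n - left)
                    else (if idx < n - right then idx + right else idx - n + right)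
        pvLoopA name n f (PySem.List.pySetD rem idx 1) idx' (a + pvVert name idx + min left right) := rfl

lemma pvHLoop_succ (n : Int) (f : Nat) (todo : List Int) (idx a : Int) (h : todo ≠ []) :
    pvHLoop n (f + 1) todo idx a =
      (let left := (PySem.List.min? (todo.map (fun s => PySem.Int.mod (idx - s) n)) (fun x => x)).getD 0
       let right := (PySem.List.min? (todo.map (fun s => PySem.Int.mod (s - idx) n)) (fun x => x)).getD 0
       let idx' := if left < right then PySem.Int.mod (idx - left) n else PySem.Int.mod (idx + right) n
       pvHLoop n f (PySem.Set.discard todo idx') idx' (a + min left right)) := by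
  simp only [pvHLoop, if_neg h]

lemma pv_main (name : String) (n : Int) :
    ∀ (fa : Nat) (rem todo : List Int) (idx aA : Int) (fb : Nat),
      pvInv n rem todo idx → todo.length + 1 ≤ fa → todo.length ≤ fb →
      pvLoopA name n fa rem idx aA
        = aA + pvVert name idx + (todo.map (pvVert name)).sum + pvHLoop n fb todo idx 0 := by
  intro fa
  induction fa with
  | zero => intro rem todo idx aA fb hinv hfa hfb; omega
  | succ f ih =>
    intro rem todo idx aA fb hinv hfa hfb
    obtain ⟨hn, hlen, hidx0, hidx1, hnd, hmem⟩ := hinv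
    have hinv' : pvInv n rem todo idx := ⟨hn, hlen, hidx0, hidx1, hnd, hmem⟩
    by_cases htodo : todo = []
    · subst htodo
      have hnone : pvLeftLoopA (PySem.List.pySetD rem idx 1) idx n n.toNat 1 = none := by
        apply pv_leftloop_none ?_ n.toNat 1 (by omega) (by omega) (by omega)
        intro l hl hl2
        by_cases hln : l < n
        · intro h0
          exact absurd ((pv_bridgeL hinv' hl hln).mp h0) (by simp)
        · have hleq : l = n := by omega
          rw [if_neg (by omega), (show idx + n - l = idx by omega),
              pv_getD_set hidx0 hidx0 (by omega), if_pos rfl]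
          omega
      rw [pvLoopA_succ, hnone, pv_hloop_nil]
      simp
    · -- todo nonempty
      have hDne : todo.map (fun s => PySem.Int.mod (idx - s) n) ≠ [] := by
        simpa using htodo
      have hDrne : todo.map (fun s => PySem.Int.mod (s - idx) n) ≠ [] := by
        simpa using htodo
      obtain ⟨hLmem, hLmin⟩ := pv_min_spec hDne
      obtain ⟨hRmem, hRmin⟩ := pv_min_spec hDrne
      set Lb := (PySem.List.min? (todo.map (fun s => PySem.Int.mod (idx - s) n)) (fun x => x)).getD 0 with hLb
      set Rb := (PySem.List.min? (todo.map (fun s => PySem.Int.mod (s - idx) n)) (fun x => x)).getD 0 with hRb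
      obtain ⟨hLb1, hLb2⟩ := pv_dist_mem_bounds hinv' (Or.inl hLmem)
      obtain ⟨hRb1, hRb2⟩ := pv_dist_mem_bounds hinv' (Or.inr hRmem)
      have hleft : pvLeftLoopA (PySem.List.pySetD rem idx 1) idx n n.toNat 1 = some Lb := by
        apply pv_leftloop_some hLb1 hLb2 ?_ ((pv_bridgeL hinv' hLb1 hLb2).mpr hLmem)
          n.toNat 1 (by omega) (by omega) (by omega)
        intro l hl hl2 h0
        have := hLmin l ((pv_bridgeL hinv' hl (by omega)).mp h0)
        omega
      have hright : pvRightLoopA (PySem.List.pySetD rem idx 1) idx n n.toNat 1 = Rb := by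
        apply pv_rightloop_some hRb1 hRb2 ?_ ((pv_bridgeR hinv' hRb1 hRb2).mpr hRmem)
          n.toNat 1 (by omega) (by omega) (by omega)
        intro r hr hr2 h0
        have := hRmin r ((pv_bridgeR hinv' hr (by omega)).mp h0)
        omega
      set idx' := if Lb < Rb then PySem.Int.mod (idx - Lb) n else PySem.Int.mod (idx + Rb) n with hidx'
      have hposA : (if Lb < Rb then (if idx ≥ Lb then idx - Lb else idx + n - Lb)
                    else (if idx < n - Rb then idx + Rb else idx - n + Rb)) = idx' := by
        rw [hidx']
        by_cases h : Lb < Rb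
        · rw [if_pos h, if_pos h]; exact pv_mod_lpos hn hidx0 hidx1 hLb1 (by omega)
        · rw [if_neg h, if_neg h]; exact pv_mod_rpos hn hidx0 hidx1 hRb1 (by omega)
      have hidx'0 : 0 ≤ idx' := by
        rw [hidx']; split_ifs <;> exact PySem.Int.mod_nonneg _ hn
      have hidx'1 : idx' < n := by
        rw [hidx']; split_ifs <;> exact PySem.Int.mod_lt _ hn
      have hidx'mem : idx' ∈ todo := by
        rw [hidx']
        split_ifs with h
        · exact (pv_mem_set hinv' _ (PySem.Int.mod_nonneg _ hn) (PySem.Int.mod_lt _ hn)).mp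
            (by rw [← pv_mod_lpos hn hidx0 hidx1 hLb1 (by omega)]
                exact (pv_bridgeL hinv' hLb1 hLb2).mpr hLmem)
        · exact (pv_mem_set hinv' _ (PySem.Int.mod_nonneg _ hn) (PySem.Int.mod_lt _ hn)).mp
            (by rw [← pv_mod_rpos hn hidx0 hidx1 hRb1 (by omega)]
                exact (pv_bridgeR hinv' hRb1 hRb2).mpr hRmem)
      have hndd : (PySem.Set.discard todo idx').Nodup := PySem.Set.nodup_discard todo idx' hnd
      have hperm : todo.Perm (idx' :: PySem.Set.discard todo idx') := by
        rw [List.perm_ext_iff_of_nodup hnd (List.nodup_cons.mpr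
          ⟨fun h => ((PySem.Set.mem_discard todo idx' idx').mp h).2 rfl, hndd⟩)]
        intro a
        rw [List.mem_cons, PySem.Set.mem_discard]
        constructor
        · intro ha
          by_cases h : a = idx'
          · exact Or.inl h
          · exact Or.inr ⟨ha, h⟩
        · rintro (rfl | ⟨ha, _⟩)
          · exact hidx'mem
          · exact ha
      have hinv2 : pvInv n (PySem.List.pySetD rem idx 1) (PySem.Set.discard todo idx') idx' := by
        refine ⟨hn, ?_, hidx'0, hidx'1, hndd, ?_⟩
        · rw [PySem.List.pySetD_of_nonneg rem 1 hidx0]; simpa using hlen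
        · intro j
          rw [PySem.Set.mem_discard]
          constructor
          · intro ⟨hj, hjne⟩
            obtain ⟨hj0, hj1, _, _⟩ := (hmem j).mp hj
            exact ⟨hj0, hj1, hjne, (pv_mem_set hinv' j hj0 hj1).mpr hj⟩
          · intro ⟨hj0, hj1, hjne, hjz⟩
            exact ⟨(pv_mem_set hinv' j hj0 hj1).mp hjz, hjne⟩
      have hlength : todo.length = (PySem.Set.discard todo idx').length + 1 := by
        have := hperm.length_eq; simpa using this
      obtain ⟨g, rfl⟩ : ∃ g, fb = g + 1 := ⟨fb - 1, by omega⟩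
      rw [pvLoopA_succ, hleft]
      simp only
      rw [hright, hposA]
      rw [ih (PySem.List.pySetD rem idx 1) (PySem.Set.discard todo idx') idx'
            (aA + pvVert name idx + min Lb Rb) g hinv2 (by omega) (by omega)]
      rw [pvHLoop_succ n g todo idx 0 htodo]
      simp only
      rw [← hLb, ← hRb, ← hidx']
      rw [pv_hloop_shift n g (PySem.Set.discard todo idx') idx' (0 + min Lb Rb)]
      have hsum : (todo.map (pvVert name)).sum
          = pvVert name idx' + ((PySem.Set.discard todo idx').map (pvVert name)).sum := by
        have := (hperm.map (pvVert name)).sum_eq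
        simpa using this
      rw [hsum]
      ring

lemma pv_vert_A {name : String} {j : Int} (h : PySem.Str.pyGet? name j = some 'A') :
    pvVert name j = 0 := by
  simp only [pvVert, pvOrdAt, h]
  decide

lemma pv_map_vert_range (name : String) :
    ((PySem.List.pyRange 0 (PySem.Str.len name) 1).map (pvVert name)).sum
      = (name.toList.map pvVertChar).sum := by
  congr 1
  apply List.ext_getElem
  · simp [PySem.List.length_pyRange_one, PySem.Str.len_eq]
  · intro k h1 h2
    simp only [List.getElem_map]
    rw [PySem.List.getElem_pyRange_one]
    have hk : k < name.toList.length := by simpa using h2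
    simp only [pvVert, pvVertChar, pvOrdAt]
    rw [(show (0 : Int) + k = (k : Int) by omega), PySem.Str.pyGet?_natCast,
        List.getElem?_eq_getElem hk]

lemma pv_top (name : String) (h : name ≠ "") : solution name = solution_alt name := by
  have hne : name.toList ≠ [] := fun hniL => h (String.toList_eq_nil_iff.mp hniL)
  have hn : 0 < PySem.Str.len name := by
    rw [PySem.Str.len_eq]
    have : name.toList.length ≠ 0 := fun h0 => hne (List.eq_nil_of_length_eq_zero h0)
    omega
  set n := PySem.Str.len name with hndef
  set p : Int → Bool := fun i => !(PySem.Str.pyGet? name i == some 'A') with hp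
  set rem0 := (PySem.List.pyRange 0 n 1).map
    (fun i => if PySem.Str.pyGet? name i = some 'A' then (1 : Int) else 0) with hrem0
  set todo0 := PySem.Set.discard (PySem.Set.ofList ((PySem.List.pyRange 0 n 1).filter p)) 0 with htodo0
  have hmem0 : ∀ j : Int, j ∈ todo0 ↔ (0 ≤ j ∧ j < n ∧ j ≠ 0 ∧ ¬(PySem.Str.pyGet? name j = some 'A')) := by
    intro j
    rw [htodo0, PySem.Set.mem_discard, PySem.Set.mem_ofList, List.mem_filter,
        PySem.List.mem_pyRange_one, hp]
    simp only [Bool.not_eq_eq_eq_not, Bool.not_true, beq_eq_false_iff_ne, ne_eq]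
    tauto
  have hgetD0 : ∀ j : Int, 0 ≤ j → j < n →
      PySem.List.pyGetD rem0 j 0 = (if PySem.Str.pyGet? name j = some 'A' then (1 : Int) else 0) := by
    intro j h0 h1
    rw [hrem0]
    exact PySem.List.pyGetD_map_pyRange_of_nonneg _ n j 0 h0 h1
  have hnd0 : todo0.Nodup := PySem.Set.nodup_discard _ _ (PySem.Set.nodup_ofList _)
  have hinv : pvInv n rem0 todo0 0 := by
    refine ⟨hn, ?_, le_refl 0, hn, hnd0, ?_⟩
    · rw [hrem0]; simp [PySem.List.length_pyRange_one]; omega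
    · intro j
      rw [hmem0 j]
      constructor
      · intro ⟨h0, h1, h2, h3⟩
        refine ⟨h0, h1, h2, ?_⟩
        rw [hgetD0 j h0 h1, if_neg h3]
      · intro ⟨h0, h1, h2, h3⟩
        refine ⟨h0, h1, h2, ?_⟩
        rw [hgetD0 j h0 h1] at h3
        by_cases hA : PySem.Str.pyGet? name j = some 'A'
        · rw [if_pos hA] at h3; omega
        · exact hA
  have hsub : todo0 ⊆ PySem.List.pyRange 1 n 1 := by
    intro j hj
    obtain ⟨h0, h1, h2, _⟩ := (hmem0 j).mp hj
    rw [PySem.List.mem_pyRange_one]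
    omega
  have hlen0 : todo0.length + 1 ≤ n.toNat := by
    have := (hnd0.subperm hsub).length_le
    rw [PySem.List.length_pyRange_one] at this
    omega
  -- vertical sum decomposition
  have hsplit : PySem.List.pyRange 0 n 1 = 0 :: PySem.List.pyRange 1 n 1 :=
    PySem.List.pyRange_one_cons hn
  have hfsum : (((PySem.List.pyRange 1 n 1).filter p).map (pvVert name) ++
      ((PySem.List.pyRange 1 n 1).filter (fun x => !p x)).map (pvVert name)).Perm
      ((PySem.List.pyRange 1 n 1).map (pvVert name)) := by
    rw [← List.map_append]
    exact (List.filter_append_perm p _).map _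
  have hzero : (((PySem.List.pyRange 1 n 1).filter (fun x => !p x)).map (pvVert name)).sum = 0 := by
    apply List.sum_eq_zero
    intro x hx
    obtain ⟨j, hj, rfl⟩ := List.mem_map.mp hx
    have hpj : p j = false := by
      have := (List.mem_filter.mp hj).2
      simpa using this
    rw [hp] at hpj
    simp only [Bool.not_eq_false', beq_iff_eq] at hpj
    exact pv_vert_A hpj
  have hpermf : ((PySem.List.pyRange 1 n 1).filter p).Perm todo0 := by
    rw [List.perm_ext_iff_of_nodup ((PySem.List.nodup_pyRange_one 1 n).filter p) hnd0]
    intro j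
    rw [List.mem_filter, PySem.List.mem_pyRange_one, hmem0 j, hp]
    simp only [Bool.not_eq_eq_eq_not, Bool.not_true, beq_eq_false_iff_ne, ne_eq]
    constructor
    · intro ⟨⟨h1, h2⟩, h3⟩; exact ⟨by omega, h2, by omega, h3⟩
    · intro ⟨h0, h1, h2, h3⟩; exact ⟨⟨by omega, h1⟩, h3⟩
  have hvert : (name.toList.map pvVertChar).sum
      = pvVert name 0 + (todo0.map (pvVert name)).sum := by
    rw [← pv_map_vert_range name, ← hndef, hsplit]
    simp only [List.map_cons, List.sum_cons]
    congr 1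
    rw [← hfsum.sum_eq, List.sum_append, hzero, add_zero]
    exact (hpermf.map (pvVert name)).sum_eq
  -- assemble
  show pvLoopA name n n.toNat rem0 0 0 = pvHLoop n todo0.length todo0 0 ((name.toList.map pvVertChar).sum)
  rw [pv_main name n n.toNat rem0 todo0 0 0 todo0.length hinv hlen0 (le_refl _),
      pv_hloop_shift n todo0.length todo0 0 ((name.toList.map pvVertChar).sum), hvert]
  ring

-- ===== VERDICT (by name: the statement is the Claim_ definition above) =====
theorem solution_spec : Claim_equal_solution := by
  intro name _ hpre
  show solution name = solution_alt name
  exact pv_top name hpre
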